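-- pv_equiv track=rewrite | github.com/adrian-lorenz/privacy-guard | privacy_guard/detectors/iban.py | _mod97
-- ===== SOURCE A (Python) =====
-- def _mod97(iban_digits: str) -> int:
--     """ISO 7064 MOD-97-10 check."""
--     remainder = 0
--     for ch in iban_digits:
--         if ch.isdigit():
--             remainder = (remainder * 10 + int(ch)) % 97
--         else:
--             # A=10, B=11, ...
--             val = ord(ch) - ord("A") + 10
--             remainder = (remainder * 100 + val) % 97
--     return remainder
-- ===== SOURCE B (Python) =====
-- def _mod97(iban_digits: str) -> int:
--     """ISO 7064 MOD-97-10 check: expand to decimal digits, then reduce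
--     right-to-left as a weighted digit sum with running powers of 10 mod 97."""
--     digits = []
--     for ch in iban_digits:
--         if ch.isdigit():
--             digits.append(ord(ch) - 48)
--         else:
--             v = ord(ch) - 55
--             digits.append(v // 10)
--             digits.append(v % 10)
--     total, weight = 0, 1
--     for d in reversed(digits):
--         total += d * weight
--         weight = weight * 10 % 97
--     return total % 97
-- ===== Notes on version B (the rewrite author's own statement) =====
-- stated objective: alternative
-- what changed: B expands each character into its decimal digits and then reduces RIGHT-TO-LEFT as a weighted digit sum (total += d*weight, weight = weight*10 % 97) with a final single % 97, instead of A's left-to-right Horner with a per-character 10-vs-100 modular step.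
import Mathlib
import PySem

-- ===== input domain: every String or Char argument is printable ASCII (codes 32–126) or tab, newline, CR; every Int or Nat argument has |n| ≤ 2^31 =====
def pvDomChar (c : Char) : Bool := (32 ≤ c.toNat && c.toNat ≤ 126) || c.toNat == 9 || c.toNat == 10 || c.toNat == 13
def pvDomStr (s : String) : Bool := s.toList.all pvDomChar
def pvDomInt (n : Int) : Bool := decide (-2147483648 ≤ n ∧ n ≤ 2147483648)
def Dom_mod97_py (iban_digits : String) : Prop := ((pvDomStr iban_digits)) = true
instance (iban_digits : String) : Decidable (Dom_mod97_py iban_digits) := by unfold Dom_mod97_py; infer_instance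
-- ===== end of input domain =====

-- B expands to a decimal-digit list and reduces it RIGHT-TO-LEFT as a weighted digit sum
-- with running powers of 10 mod 97, instead of A's left-to-right modular Horner (objective: alternative).

-- ===== PORT A =====
-- A's loop: one fold over the characters, branching per character.
-- int(ch) on a single char passing isdigit (ASCII '0'..'9' on Dom) is exactly code - 48.
def mod97_py (iban_digits : String) : Int :=
  iban_digits.toList.foldl
    (fun remainder ch =>
      if PySem.Chars.isdigit ch then
        PySem.Int.mod (remainder * 10 + ((ch.toNat : Int) - 48)) 97
      else
        PySem.Int.mod (remainder * 100 + ((ch.toNat : Int) - 65 + 10)) 97)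
    0

-- ===== PORT B =====
-- first Source B loop: build the decimal-digit list (digits as-is, others as the two digits of ord-55)
def pvDigitsB (iban_digits : String) : List Int :=
  iban_digits.toList.foldl
    (fun acc ch =>
      if PySem.Chars.isdigit ch then acc ++ [(ch.toNat : Int) - 48]
      else
        let v : Int := (ch.toNat : Int) - 55
        acc ++ [PySem.Int.floordiv v 10, PySem.Int.mod v 10])
    []

-- second Source B loop over reversed(digits): (total, weight) accumulator; final single % 97
def mod97_py_alt (iban_digits : String) : Int :=
  let digits := pvDigitsB iban_digits
  let p := digits.reverse.foldl
    (fun (tw : Int × Int) d => (tw.1 + d * tw.2, PySem.Int.mod (tw.2 * 10) 97))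
    (0, 1)
  PySem.Int.mod p.1 97

-- ===== PRECONDITION & SPEC =====
def Spec_mod97_py (iban_digits : String) (out : Int) : Prop := out = mod97_py_alt iban_digits
instance (iban_digits : String) (out : Int) : Decidable (Spec_mod97_py iban_digits out) := by unfold Spec_mod97_py; infer_instance

-- ===== CLAIM (what is proved, stated in full; the proofs are below) =====
def Claim_equal_mod97_py : Prop := ∀ (iban_digits : String), Dom_mod97_py iban_digits → Spec_mod97_py iban_digits (mod97_py iban_digits)

-- ===== LEMMAS AND PROOFS =====

-- the per-character expansion, as a flatMap
def pvExpand (ch : Char) : List Int :=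
  if PySem.Chars.isdigit ch then [(ch.toNat : Int) - 48]
  else
    let v : Int := (ch.toNat : Int) - 55
    [PySem.Int.floordiv v 10, PySem.Int.mod v 10]

-- pure (mod-free) Horner value of a digit list
def pvNum (r : Int) (l : List Int) : Int := l.foldl (fun a d => a * 10 + d) r

-- value of a digit list read with weights 10^position (position 0 = head)
def pvRnum (l : List Int) : Int := l.foldr (fun d a => d + 10 * a) 0

theorem pv_foldl_append (f : Char → List Int) (l : List Char) (acc : List Int) :
    l.foldl (fun acc x => acc ++ f x) acc = acc ++ l.flatMap f := by
  induction l generalizing acc with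
  | nil => simp
  | cons x tl ih => simp [ih]

theorem pvDigitsB_eq_flatMap (s : String) : s.toList.flatMap pvExpand = pvDigitsB s := by
  unfold pvDigitsB
  have hstep : (fun (acc : List Int) ch =>
      if PySem.Chars.isdigit ch then acc ++ [(ch.toNat : Int) - 48]
      else
        let v : Int := (ch.toNat : Int) - 55
        acc ++ [PySem.Int.floordiv v 10, PySem.Int.mod v 10])
      = fun (acc : List Int) ch => acc ++ pvExpand ch := by
    funext acc ch
    unfold pvExpand
    by_cases h : PySem.Chars.isdigit ch <;> simp [h]
  rw [hstep, pv_foldl_append]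
  simp

theorem pv_mod97 (a : Int) : PySem.Int.mod a 97 = a % 97 :=
  PySem.Int.mod_eq_emod_of_pos (by norm_num)

-- A's branching fold equals the mod-Horner fold over the flatMap expansion
theorem pvA_eq_modH (l : List Char) (r : Int) :
    l.foldl
      (fun remainder ch =>
        if PySem.Chars.isdigit ch then
          PySem.Int.mod (remainder * 10 + ((ch.toNat : Int) - 48)) 97
        else
          PySem.Int.mod (remainder * 100 + ((ch.toNat : Int) - 65 + 10)) 97) r
    = (l.flatMap pvExpand).foldl (fun a d => PySem.Int.mod (a * 10 + d) 97) r := by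
  induction l generalizing r with
  | nil => rfl
  | cons ch tl ih =>
    simp only [List.flatMap_cons, List.foldl_append, List.foldl_cons]
    rw [ih]
    congr 1
    unfold pvExpand
    by_cases h : PySem.Chars.isdigit ch <;> simp [h, List.foldl]
    · omega

-- mod-Horner equals pure Horner mod 97 (start the mod fold at r % 97)
theorem pv_modH_eq_num (l : List Int) (r : Int) :
    l.foldl (fun a d => (a * 10 + d) % 97) (r % 97) = pvNum r l % 97 := by
  induction l generalizing r with
  | nil => simp [pvNum]
  | cons d tl ih =>
    simp only [List.foldl_cons]
    have h1 : (r % 97 * 10 + d) % 97 = (r * 10 + d) % 97 := by omega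
    have h2 : pvNum r (d :: tl) = pvNum (r * 10 + d) tl := by simp [pvNum]
    rw [h1, ih (r * 10 + d), h2]

theorem pv_mulmod (a b : Int) : a % 97 * b % 97 = a * b % 97 := by
  conv_lhs => rw [Int.mul_emod, Int.emod_emod_of_dvd a (dvd_refl 97), ← Int.mul_emod]

-- B's weighted fold: total ≡ t + w · (positional value of m) (mod 97)
theorem pvWS (m : List Int) (t w : Int) :
    (m.foldl (fun (tw : Int × Int) d => (tw.1 + d * tw.2, tw.2 * 10 % 97)) (t, w)).1 % 97
      = (t + w * pvRnum m) % 97 := by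
  induction m generalizing t w with
  | nil => simp [pvRnum]
  | cons d tl ih =>
    simp only [List.foldl_cons, pvRnum, List.foldr_cons]
    rw [ih]
    have key : (w * 10 % 97) * pvRnum tl % 97 = w * 10 * pvRnum tl % 97 := pv_mulmod (w * 10) _
    calc (t + d * w + (w * 10 % 97) * pvRnum tl) % 97
        = (t + d * w + w * 10 * pvRnum tl) % 97 := by
          rw [Int.add_emod, key, ← Int.add_emod]
      _ = (t + w * (d + 10 * pvRnum tl)) % 97 := by congr 1; ring

-- pure Horner from r, split off the starting accumulator
theorem pvNum_split (l : List Int) (r : Int) :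
    pvNum r l = r * 10 ^ l.length + pvNum 0 l := by
  induction l generalizing r with
  | nil => simp [pvNum]
  | cons d tl ih =>
    have h1 : pvNum r (d :: tl) = pvNum (r * 10 + d) tl := by simp [pvNum]
    have h2 : pvNum 0 (d :: tl) = pvNum d tl := by simp [pvNum]
    rw [h1, h2, ih (r * 10 + d), ih d, List.length_cons]
    ring

theorem pvRnum_append (xs : List Int) (d : Int) :
    pvRnum (xs ++ [d]) = pvRnum xs + 10 ^ xs.length * d := by
  induction xs with
  | nil => simp [pvRnum]
  | cons x tl ih =>
    simp only [List.cons_append, pvRnum, List.foldr_cons, List.length_cons] at *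
    rw [ih]; ring

theorem pvRnum_reverse (l : List Int) : pvRnum l.reverse = pvNum 0 l := by
  induction l with
  | nil => rfl
  | cons d tl ih =>
    rw [List.reverse_cons, pvRnum_append, ih, List.length_reverse]
    have h2 : pvNum 0 (d :: tl) = pvNum d tl := by simp [pvNum]
    rw [h2, pvNum_split tl d]
    ring

-- ===== VERDICT (by name: the statement is the Claim_ definition above) =====
theorem mod97_py_spec : Claim_equal_mod97_py := by
  intro s _
  unfold Spec_mod97_py mod97_py mod97_py_alt
  rw [pvA_eq_modH, ← pvDigitsB_eq_flatMap]
  simp only [pv_mod97]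
  have hA : (s.toList.flatMap pvExpand).foldl (fun a d => (a * 10 + d) % 97) 0
      = pvNum 0 (s.toList.flatMap pvExpand) % 97 := by
    have := pv_modH_eq_num (s.toList.flatMap pvExpand) 0
    simpa using this
  rw [hA, pvWS, pvRnum_reverse]
  simp
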